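-- pv_equiv track=rewrite | github.com/cruzpeanelo/fabrica-de-workers | factory/billing/middleware.py | _extract_tenant_from_path
-- ===== SOURCE A (Python) =====
-- from typing import Optional, Callable, Any
--
-- def _extract_tenant_from_path(path: str) -> Optional[str]:
--     """
--     Extrai tenant_id do path.
--
--     Exemplo: /api/v1/tenants/TEN-123/projects -> TEN-123
--     """
--     parts = path.split("/")
--     for i, part in enumerate(parts):
--         if part == "tenants" and i + 1 < len(parts):
--             potential_id = parts[i + 1]
--             if potential_id.startswith("TEN-"):
--                 return potential_id
--     return None
-- ===== SOURCE B (Python) =====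
-- from typing import Optional
--
--
-- def _extract_tenant_from_path(path: str) -> Optional[str]:
--     """Substring search instead of split: find the first whole segment
--     'tenants' immediately followed by a segment starting with 'TEN-'."""
--     s = "/" + path + "/"
--     k = s.find("/tenants/TEN-")
--     if k == -1:
--         return None
--     start = k + 9  # len("/tenants/")
--     end = s.find("/", start)
--     return s[start:end]
-- ===== Notes on version B (the rewrite author's own statement) =====
-- stated objective: alternative
-- what changed: Replaces split('/')-then-indexed-scan over segments by a single substring search: wrap the path in slashes and s.find the literal '/tenants/TEN-', then cut the id at the next '/'.
import Mathlib
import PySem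

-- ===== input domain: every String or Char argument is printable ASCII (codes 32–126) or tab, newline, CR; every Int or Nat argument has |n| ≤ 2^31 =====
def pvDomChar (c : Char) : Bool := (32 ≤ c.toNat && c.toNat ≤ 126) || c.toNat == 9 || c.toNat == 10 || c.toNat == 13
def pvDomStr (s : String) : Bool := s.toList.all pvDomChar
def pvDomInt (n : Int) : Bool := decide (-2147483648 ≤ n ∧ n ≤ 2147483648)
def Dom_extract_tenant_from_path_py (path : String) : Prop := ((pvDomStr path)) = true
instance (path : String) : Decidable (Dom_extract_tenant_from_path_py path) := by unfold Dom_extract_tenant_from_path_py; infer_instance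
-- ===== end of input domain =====

-- B replaces A's split('/')-and-scan over segments by a single substring search for
-- "/tenants/TEN-" in the slash-wrapped path (alternative algorithm, same cost).


-- ===== PORT A =====
-- A's for-loop over enumerate(parts): a part equal to "tenants" with a following
-- part that starts with "TEN-" returns that following part, else the scan continues
def extractLoopA : List String → Option String
  | p :: q :: rest =>
    if p == "tenants" then
      if PySem.Str.startswith q "TEN-" then some q else extractLoopA (q :: rest)
    else extractLoopA (q :: rest)
  | _ => none

def extract_tenant_from_path_py (path : String) : Option String :=
  match PySem.Str.split? path "/" with
  | some parts => extractLoopA parts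
  | none => none  -- unreachable: the separator "/" is nonempty

-- ===== PORT B =====
def extract_tenant_from_path_py_alt (path : String) : Option String :=
  let s := "/" ++ path ++ "/"
  let k := PySem.Str.find s "/tenants/TEN-"
  if k = -1 then none
  else
    let st := k + 9
    let e := PySem.Str.findFrom s "/" st
    some (PySem.Str.slice s (some st) (some e))

-- ===== PRECONDITION & SPEC =====
def Spec_extract_tenant_from_path_py (path : String) (out : Option String) : Prop := out = extract_tenant_from_path_py_alt path
instance (path : String) (out : Option String) : Decidable (Spec_extract_tenant_from_path_py path out) := by unfold Spec_extract_tenant_from_path_py; infer_instance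

-- ===== CLAIM (what is proved, stated in full; the proofs are below) =====
def Claim_equal_extract_tenant_from_path_py : Prop := ∀ (path : String), Dom_extract_tenant_from_path_py path → Spec_extract_tenant_from_path_py path (extract_tenant_from_path_py path)

-- ===== LEMMAS AND PROOFS =====

def mapHd (f : List Char → List Char) : List (List Char) → List (List Char)
  | [] => []
  | x :: xs => f x :: xs
def pureSplit : List Char → List (List Char)
  | [] => [[]]
  | c :: r => if c = '/' then [] :: pureSplit r else mapHd (c :: ·) (pureSplit r)

theorem pureSplit_head : ∀ cs : List Char, ∃ t, pureSplit cs = cs.takeWhile (· ≠ '/') :: t := by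
  intro cs
  induction cs with
  | nil => exact ⟨[], rfl⟩
  | cons c r ih =>
    obtain ⟨t, ht⟩ := ih
    by_cases hc : c = '/'
    · subst hc; exact ⟨pureSplit r, by simp [pureSplit]⟩
    · exact ⟨t, by simp [pureSplit, hc, ht, mapHd]⟩

theorem pureSplit_no_slash : ∀ cs : List Char, '/' ∉ cs → pureSplit cs = [cs] := by
  intro cs h
  induction cs with
  | nil => rfl
  | cons c r ih =>
    have hc : c ≠ '/' := fun e => h (e ▸ List.mem_cons_self)
    have := ih (fun m => h (List.mem_cons_of_mem _ m))
    simp [pureSplit, hc, this, mapHd]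

theorem pureSplit_append : ∀ (seg rest : List Char), '/' ∉ seg →
    pureSplit (seg ++ '/' :: rest) = seg :: pureSplit rest := by
  intro seg rest h
  induction seg with
  | nil => simp [pureSplit]
  | cons c s ih =>
    have hc : c ≠ '/' := fun e => h (e ▸ List.mem_cons_self)
    have := ih (fun m => h (List.mem_cons_of_mem _ m))
    simp [pureSplit, hc, this, mapHd]

theorem mapHd_nil_append : ∀ l, mapHd (fun x => [] ++ x) l = l := by
  intro l; cases l <;> simp [mapHd]

theorem mapHd_mapHd (f g : List Char → List Char) : ∀ l, mapHd f (mapHd g l) = mapHd (fun x => f (g x)) l := by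
  intro l; cases l <;> simp [mapHd]

theorem splitOn_go_eq : ∀ (l : List Char) (fuel : Nat) (cur : List Char) (acc : List (List Char)),
    l.length < fuel →
    PySem.Chars.splitOn.go ['/'] fuel l cur.reverse acc = acc.reverse ++ mapHd (cur ++ ·) (pureSplit l) := by
  intro l
  induction l with
  | nil =>
    intro fuel cur acc h
    match fuel with
    | f + 1 => simp [PySem.Chars.splitOn.go, pureSplit, mapHd]
  | cons c r ih =>
    intro fuel cur acc h
    match fuel, h with
    | f + 1, h =>
      by_cases hc : c = '/'
      · subst hc
        have h1 : (['/'] : List Char).isPrefixOf ('/' :: r) = true := by simp [List.isPrefixOf]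
        have h2 := ih f [] (cur :: acc) (by simpa using h)
        simp only [List.reverse_nil] at h2
        simp only [PySem.Chars.splitOn.go, h1, if_true, List.reverse_reverse]
        rw [show (List.drop ['/'].length ('/' :: r)) = r by simp]
        rw [h2, mapHd_nil_append]
        simp [pureSplit, mapHd]
      · have h1 : (['/'] : List Char).isPrefixOf (c :: r) = false := by
          simp [List.isPrefixOf]
          intro h'; exact hc h'.symm
        have := ih f (cur ++ [c]) acc (by simpa using h)
        simp only [List.reverse_append, List.reverse_cons, List.reverse_nil, List.nil_append,
          List.singleton_append] at this
        simp only [PySem.Chars.splitOn.go, h1, Bool.false_eq_true, if_false]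
        rw [this]
        simp only [pureSplit, hc, if_false, mapHd_mapHd]
        congr 1
        apply congrFun
        congr 1
        funext x
        simp

theorem splitOn_eq_pureSplit (cs : List Char) : PySem.Chars.splitOn cs ['/'] = pureSplit cs := by
  have h := splitOn_go_eq cs (cs.length + 1) [] [] (by omega)
  simp only [List.reverse_nil] at h
  rw [PySem.Chars.splitOn, h, mapHd_nil_append]
  rfl

theorem findgo_shift (sub : List Char) : ∀ (t : List Char) (k : Nat),
    PySem.Chars.find.go sub t k =
      if PySem.Chars.find.go sub t 0 = -1 then -1 else (k : Int) + PySem.Chars.find.go sub t 0 := by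
  intro t
  induction t with
  | nil =>
    intro k
    by_cases he : sub.isEmpty <;> simp [PySem.Chars.find.go, he]
  | cons c r ih =>
    intro k
    by_cases hp : sub.isPrefixOf (c :: r)
    · simp [PySem.Chars.find.go, hp]
    · have hge : -1 ≤ PySem.Chars.find.go sub r 0 := by
        have := PySem.Chars.neg_one_le_find r sub
        simpa [PySem.Chars.find] using this
      simp only [PySem.Chars.find.go, hp, Bool.false_eq_true, if_false]
      rw [ih (k + 1), ih 1]
      split_ifs <;> push_cast <;> omega

theorem find_cons (c : Char) (t sub : List Char) :
    PySem.Chars.find (c :: t) sub =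
      if sub.isPrefixOf (c :: t) then 0
      else if PySem.Chars.find t sub = -1 then -1 else 1 + PySem.Chars.find t sub := by
  by_cases hp : sub.isPrefixOf (c :: t)
  · simp [PySem.Chars.find, PySem.Chars.find.go, hp]
  · simp only [PySem.Chars.find, PySem.Chars.find.go, hp, Bool.false_eq_true, if_false]
    rw [findgo_shift sub t 1]
    norm_num

theorem find_skip (p : List Char) : ∀ (seg t : List Char), '/' ∉ seg →
    PySem.Chars.find (seg ++ t) ('/' :: p) =
      if PySem.Chars.find t ('/' :: p) = -1 then -1
      else (seg.length : Int) + PySem.Chars.find t ('/' :: p) := by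
  intro seg
  induction seg with
  | nil =>
    intro t h
    by_cases h0 : PySem.Chars.find t ('/' :: p) = -1 <;> simp [h0]
  | cons c s ih =>
    intro t h
    have hc : c ≠ '/' := fun e => h (e ▸ List.mem_cons_self)
    have hp : ('/' :: p).isPrefixOf (c :: (s ++ t)) = false := by
      simp [List.isPrefixOf]
      intro h'; exact absurd h'.symm hc
    have hih := ih t (fun m => h (List.mem_cons_of_mem _ m))
    have hge : -1 ≤ PySem.Chars.find t ('/' :: p) := PySem.Chars.neg_one_le_find _ _
    rw [List.cons_append, find_cons, hp]
    simp only [Bool.false_eq_true, if_false]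
    rw [hih]
    by_cases h0 : PySem.Chars.find t ('/' :: p) = -1
    · simp [h0]
    · have h1 : ¬ ((s.length : Int) + PySem.Chars.find t ('/' :: p) = -1) := by omega
      simp only [if_neg h0, if_neg h1]
      push_cast [List.length_cons]
      omega

theorem prefix_slash : ∀ (p : List Char), '/' ∉ p → ∀ (seg t : List Char),
    (p <+: seg ++ '/' :: t ↔ p <+: seg) := by
  intro p
  induction p with
  | nil => intro _ seg t; simp
  | cons c p' ih =>
    intro h seg t
    have hc : c ≠ '/' := fun e => h (e ▸ List.mem_cons_self)
    have hp' : '/' ∉ p' := fun m => h (List.mem_cons_of_mem _ m)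
    cases seg with
    | nil =>
      simp only [List.nil_append, List.cons_prefix_cons]
      constructor
      · rintro ⟨rfl, _⟩; exact absurd rfl hc
      · rintro h'; exact absurd (List.IsPrefix.length_le h') (by simp)
    | cons d seg' =>
      simp only [List.cons_append, List.cons_prefix_cons]
      exact and_congr_right fun _ => ih hp' seg' t

theorem append_prefix_iff : ∀ (a b l : List Char),
    (a ++ b <+: l ↔ a <+: l ∧ b <+: l.drop a.length) := by
  intro a
  induction a with
  | nil => intro b l; simp
  | cons c a' ih =>
    intro b l
    cases l with
    | nil => simp
    | cons d l' =>
      simp only [List.cons_append, List.cons_prefix_cons, List.length_cons, List.drop_succ_cons]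
      rw [ih b l']
      tauto

theorem ten_prefix (rest : List Char) :
    ("TEN-".toList <+: rest ++ ['/'] ↔ "TEN-".toList <+: rest.takeWhile (· ≠ '/')) := by
  have hq : '/' ∉ rest.takeWhile (· ≠ '/') := by
    intro m
    have := List.mem_takeWhile_imp m
    simp at this
  have hdec := (List.takeWhile_append_dropWhile (p := (· ≠ '/')) (l := rest)).symm
  have hten : '/' ∉ "TEN-".toList := by decide
  cases hd : rest.dropWhile (· ≠ '/') with
  | nil =>
    conv_lhs => rw [hdec, hd]
    simp only [List.append_nil]
    exact prefix_slash _ hten _ []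
  | cons e r2 =>
    have he : e = '/' := by
      have := List.head_dropWhile_not (· ≠ '/') (l := rest) (by rw [hd]; exact List.cons_ne_nil _ _)
      simp only [hd, List.head_cons] at this
      simpa using this
    subst he
    conv_lhs => rw [hdec, hd]
    rw [List.append_assoc]
    exact prefix_slash _ hten _ _

theorem find_slash_rest (rest : List Char) :
    PySem.Chars.find (rest ++ ['/']) ['/'] = ((rest.takeWhile (· ≠ '/')).length : Int) := by
  have hq : '/' ∉ rest.takeWhile (· ≠ '/') := by
    intro m; have := List.mem_takeWhile_imp m; simp at this
  have hdec := (List.takeWhile_append_dropWhile (p := (· ≠ '/')) (l := rest)).symm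
  have hzero : ∀ t : List Char, PySem.Chars.find ('/' :: t) ['/'] = 0 := by
    intro t
    rw [find_cons]
    simp [List.isPrefixOf]
  cases hd : rest.dropWhile (· ≠ '/') with
  | nil =>
    conv_lhs => rw [hdec, hd]
    simp only [List.append_nil]
    rw [find_skip [] _ ['/'] hq, hzero]
    simp
  | cons e r2 =>
    have he : e = '/' := by
      have := List.head_dropWhile_not (· ≠ '/') (l := rest) (by rw [hd]; exact List.cons_ne_nil _ _)
      simp only [hd, List.head_cons] at this
      simpa using this
    subst he
    conv_lhs => rw [hdec, hd]
    rw [List.append_assoc, List.cons_append, find_skip [] _ _ hq, hzero]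
    simp

theorem no_match (cs : List Char) (h : '/' ∉ cs) :
    ¬ ("tenants/TEN-".toList <+: cs ++ ['/']) := by
  intro hpre
  have hsplit : "tenants/TEN-".toList = "tenants".toList ++ '/' :: "TEN-".toList := by decide
  rw [hsplit, append_prefix_iff] at hpre
  obtain ⟨h1, h2⟩ := hpre
  have h1' : "tenants".toList <+: cs := by
    have := prefix_slash "tenants".toList (by decide) cs []
    rw [← this]
    exact h1
  obtain ⟨cs2, rfl⟩ := h1'
  have hdrop : List.drop ("tenants".toList).length (("tenants".toList ++ cs2) ++ ['/']) = cs2 ++ ['/'] := by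
    rw [List.append_assoc, List.drop_left]
  rw [hdrop] at h2
  cases cs2 with
  | nil =>
    rw [List.nil_append, List.cons_prefix_cons] at h2
    exact absurd (List.IsPrefix.length_le h2.2) (by decide)
  | cons c r =>
    rw [List.cons_append, List.cons_prefix_cons] at h2
    have hc : c ≠ '/' := fun e => h (by simp [e])
    exact hc h2.1.symm

theorem cond_iff (seg rest : List Char) (h : '/' ∉ seg) :
    ("tenants/TEN-".toList <+: seg ++ '/' :: (rest ++ ['/']) ↔
      seg = "tenants".toList ∧ "TEN-".toList <+: rest.takeWhile (· ≠ '/')) := by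
  have hsplit : "tenants/TEN-".toList = "tenants".toList ++ '/' :: "TEN-".toList := by decide
  constructor
  · intro hpre
    rw [hsplit, append_prefix_iff] at hpre
    obtain ⟨h1, h2⟩ := hpre
    have h1' : "tenants".toList <+: seg := by
      rw [← prefix_slash "tenants".toList (by decide) seg (rest ++ ['/'])]
      exact h1
    obtain ⟨seg2, rfl⟩ := h1'
    have hdrop : List.drop ("tenants".toList).length (("tenants".toList ++ seg2) ++ '/' :: (rest ++ ['/'])) = seg2 ++ '/' :: (rest ++ ['/']) := by
      rw [List.append_assoc, List.drop_left]
    rw [hdrop] at h2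
    cases seg2 with
    | nil =>
      rw [List.nil_append, List.cons_prefix_cons] at h2
      refine ⟨by simp, ?_⟩
      rw [← ten_prefix]
      exact h2.2
    | cons c r =>
      rw [List.cons_append, List.cons_prefix_cons] at h2
      have hc : c ≠ '/' := fun e => h (by simp [e])
      exact absurd h2.1.symm hc
  · rintro ⟨rfl, hten⟩
    rw [← ten_prefix] at hten
    obtain ⟨w, hw⟩ := hten
    rw [hsplit]
    exact ⟨w, by rw [List.append_assoc, List.cons_append, hw]⟩
def loopAL : List (List Char) → Option (List Char)
  | p :: q :: rest =>
    if p = "tenants".toList then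
      if "TEN-".toList <+: q then some q else loopAL (q :: rest)
    else loopAL (q :: rest)
  | _ => none
def BcoreL (cs : List Char) : Option (List Char) :=
  let s : List Char := '/' :: cs ++ ['/']
  let k := PySem.Chars.find s "/tenants/TEN-".toList
  if k = -1 then none
  else
    let st := k + 9
    let e := PySem.Chars.findFrom s ['/'] st
    some (PySem.Chars.slice s (some st) (some e))

theorem loopAL_cons_cons (p q : List Char) (tail : List (List Char)) :
    loopAL (p :: q :: tail) =
      if p = "tenants".toList then
        (if "TEN-".toList <+: q then some q else loopAL (q :: tail))
      else loopAL (q :: tail) := rfl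


theorem hpat : ("/tenants/TEN-".toList : List Char) = '/' :: "tenants/TEN-".toList := by decide

theorem Bcore_hit (rest : List Char) (hten : "TEN-".toList <+: rest.takeWhile (· ≠ '/')) :
    BcoreL ("tenants".toList ++ '/' :: rest) = some (rest.takeWhile (· ≠ '/')) := by
  simp only [BcoreL]
  have hsym : ('/' :: ("tenants".toList ++ '/' :: rest) ++ ['/'] : List Char)
      = '/' :: ("tenants".toList ++ '/' :: (rest ++ ['/'])) := by simp
  rw [hsym]
  have hk : PySem.Chars.find ('/' :: ("tenants".toList ++ '/' :: (rest ++ ['/']))) "/tenants/TEN-".toList = 0 := by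
    rw [find_cons]
    have hp : ("/tenants/TEN-".toList).isPrefixOf ('/' :: ("tenants".toList ++ '/' :: (rest ++ ['/']))) = true := by
      rw [List.isPrefixOf_iff_prefix, hpat, List.cons_prefix_cons]
      exact ⟨rfl, (cond_iff _ _ (by decide)).mpr ⟨rfl, hten⟩⟩
    rw [hp]
    simp
  rw [hk]
  norm_num
  have hdrop9 : List.drop 9 ('/' :: ("tenants".toList ++ '/' :: (rest ++ ['/']))) = rest ++ ['/'] := by
    have h1 : ('/' :: ("tenants".toList ++ '/' :: (rest ++ ['/'])) : List Char)
        = ('/' :: "tenants".toList ++ ['/']) ++ (rest ++ ['/']) := by simp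
    rw [h1, show (9:Nat) = (('/' :: "tenants".toList ++ ['/'] : List Char)).length from by decide, List.drop_left]
  have hlen : 9 ≤ ('/' :: ("tenants".toList ++ '/' :: (rest ++ ['/'])) : List Char).length := by
    simp
  have hff : PySem.Chars.findFrom ('/' :: ("tenants".toList ++ '/' :: (rest ++ ['/']))) ['/'] 9
      = 9 + ((rest.takeWhile (· ≠ '/')).length : Int) := by
    rw [show (9:Int) = ((9:Nat):Int) from by norm_num, PySem.Chars.findFrom_natCast _ _ 9 hlen, hdrop9, find_slash_rest]
    rw [if_neg (by omega)]
  rw [hff]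
  rw [show (9 : Int) + ((rest.takeWhile (· ≠ '/')).length : Int)
      = (((9 + (rest.takeWhile (· ≠ '/')).length : Nat)) : Int) from by push_cast; ring]
  rw [show (9:Int) = ((9:Nat):Int) from by norm_num, PySem.List.slice_natCast, hdrop9]
  obtain ⟨w, hw⟩ := List.takeWhile_prefix (l := rest) (p := (· ≠ '/'))
  rw [show (9 + (rest.takeWhile (· ≠ '/')).length - 9) = (rest.takeWhile (· ≠ '/')).length from by omega]
  rw [show rest ++ ['/'] = List.takeWhile (fun x => decide (x ≠ '/')) rest ++ (w ++ ['/'])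
      from by rw [← List.append_assoc, hw], List.take_left]
  simp

theorem Bcore_noslash (cs : List Char) (h : '/' ∉ cs) : BcoreL cs = none := by
  simp only [BcoreL]
  rw [show ('/' :: cs ++ ['/'] : List Char) = '/' :: (cs ++ ['/']) from by simp]
  have hk : PySem.Chars.find ('/' :: (cs ++ ['/'])) "/tenants/TEN-".toList = -1 := by
    rw [find_cons]
    have hp : ("/tenants/TEN-".toList).isPrefixOf ('/' :: (cs ++ ['/'])) = false := by
      rw [Bool.eq_false_iff]
      intro hb
      rw [List.isPrefixOf_iff_prefix, hpat, List.cons_prefix_cons] at hb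
      exact no_match cs h hb.2
    rw [hp]
    rw [hpat, find_skip _ cs ['/'] h]
    rw [show PySem.Chars.find ['/'] ('/' :: "tenants/TEN-".toList) = -1 from by decide]
    simp
  rw [hk]
  simp

theorem Bcore_skip (seg rest : List Char) (hseg : '/' ∉ seg)
    (hnc : ¬(seg = "tenants".toList ∧ "TEN-".toList <+: rest.takeWhile (· ≠ '/'))) :
    BcoreL (seg ++ '/' :: rest) = BcoreL rest := by
  simp only [BcoreL]
  rw [show ('/' :: (seg ++ '/' :: rest) ++ ['/'] : List Char) = '/' :: (seg ++ '/' :: (rest ++ ['/'])) from by simp]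
  rw [show ('/' :: rest ++ ['/'] : List Char) = '/' :: (rest ++ ['/']) from by simp]
  set s' : List Char := '/' :: (rest ++ ['/']) with hs'
  have hcons0 : ("/tenants/TEN-".toList).isPrefixOf ('/' :: (seg ++ '/' :: (rest ++ ['/']))) = false := by
    rw [Bool.eq_false_iff]
    intro hb
    rw [List.isPrefixOf_iff_prefix, hpat, List.cons_prefix_cons] at hb
    exact hnc ((cond_iff seg rest hseg).mp hb.2)
  have hm1 : -1 ≤ PySem.Chars.find s' "/tenants/TEN-".toList := PySem.Chars.neg_one_le_find _ _
  have hk : PySem.Chars.find ('/' :: (seg ++ '/' :: (rest ++ ['/']))) "/tenants/TEN-".toList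
      = if PySem.Chars.find s' "/tenants/TEN-".toList = -1 then -1
        else (seg.length : Int) + 1 + PySem.Chars.find s' "/tenants/TEN-".toList := by
    rw [find_cons, hcons0]
    rw [hpat, find_skip _ seg _ hseg]
    rw [← hpat, ← hs']
    split_ifs <;> first | contradiction | omega
  by_cases hf2 : PySem.Chars.find s' "/tenants/TEN-".toList = -1
  · rw [hk, if_pos hf2]
    rw [if_pos hf2]
    simp
  · obtain ⟨k2, hk2⟩ : ∃ k2 : Nat, PySem.Chars.find s' "/tenants/TEN-".toList = (k2 : Int) :=
      ⟨(PySem.Chars.find s' "/tenants/TEN-".toList).toNat, by omega⟩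
    have hpre := (PySem.Chars.find_spec (s := s') (sub := "/tenants/TEN-".toList) (by omega)).1
    have hlen13 : k2 + 13 ≤ s'.length := by
      have hl := List.IsPrefix.length_le hpre
      rw [List.length_drop, hk2] at hl
      simp only [Int.toNat_natCast] at hl
      have h13 : ("/tenants/TEN-".toList).length = 13 := by decide
      omega
    have hs'len : s'.length = rest.length + 2 := by simp [hs']
    rw [hk, hk2]
    rw [if_neg (by omega), if_neg (by omega), if_neg (by omega)]
    have hK : ((seg.length : Int) + 1 + (k2:Int)) + 9 = ((seg.length + 1 + k2 + 9 : Nat) : Int) := by push_cast; ring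
    have hK' : ((k2:Int)) + 9 = ((k2 + 9 : Nat) : Int) := by push_cast; ring
    rw [hK, hK']
    have hsdecomp : ('/' :: (seg ++ '/' :: (rest ++ ['/'])) : List Char) = ('/' :: seg) ++ s' := by simp [hs']
    have hdropK : List.drop (seg.length + 1 + k2 + 9) ('/' :: (seg ++ '/' :: (rest ++ ['/'])))
        = List.drop (k2 + 9) s' := by
      rw [hsdecomp]
      rw [show seg.length + 1 + k2 + 9 = ('/'::seg : List Char).length + (k2 + 9) from by simp; omega]
      exact List.drop_length_add_append _
    have hlen1 : seg.length + 1 + k2 + 9 ≤ ('/' :: (seg ++ '/' :: (rest ++ ['/'])) : List Char).length := by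
      simp
      omega
    have hlen2 : k2 + 9 ≤ s'.length := by omega
    rw [PySem.Chars.findFrom_natCast _ _ _ hlen1, PySem.Chars.findFrom_natCast _ _ _ hlen2, hdropK]
    have hFne : ¬ (PySem.Chars.find (List.drop (k2+9) s') ['/'] = -1) := by
      rw [PySem.Chars.find_eq_neg_one_iff, not_not]
      rw [show (s' : List Char) = ('/'::rest) ++ ['/'] from by simp [hs'],
        List.drop_append_of_le_length (by simp; omega)]
      exact List.IsSuffix.isInfix (List.suffix_append _ _)
    obtain ⟨f, hf⟩ : ∃ f : Nat, PySem.Chars.find (List.drop (k2+9) s') ['/'] = (f:Int) :=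
      ⟨(PySem.Chars.find (List.drop (k2+9) s') ['/']).toNat,
        by have := PySem.Chars.neg_one_le_find (List.drop (k2+9) s') ['/']; omega⟩
    rw [hf]
    rw [if_neg (by omega), if_neg (by omega)]
    congr 1
    rw [show ((seg.length + 1 + k2 + 9 : Nat) : Int) + (f:Int) = ((seg.length + 1 + k2 + 9 + f : Nat) : Int) from by push_cast; ring]
    rw [show ((k2 + 9 : Nat) : Int) + (f:Int) = ((k2 + 9 + f : Nat) : Int) from by push_cast; ring]
    rw [PySem.Chars.slice_eq_listSlice, PySem.Chars.slice_eq_listSlice,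
      PySem.List.slice_natCast, PySem.List.slice_natCast, hdropK]
    congr 1
    omega

theorem decomp (cs : List Char) (hs : '/' ∈ cs) :
    ∃ seg rest, '/' ∉ seg ∧ cs = seg ++ '/' :: rest := by
  have hq : '/' ∉ cs.takeWhile (· ≠ '/') := by
    intro m; have := List.mem_takeWhile_imp m; simp at this
  cases hd : cs.dropWhile (· ≠ '/') with
  | nil =>
    exfalso
    have h1 := List.takeWhile_append_dropWhile (p := (· ≠ '/')) (l := cs)
    rw [hd, List.append_nil] at h1
    exact hq (by rw [h1]; exact hs)
  | cons e r2 =>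
    have he : e = '/' := by
      have := List.head_dropWhile_not (· ≠ '/') (l := cs) (by rw [hd]; exact List.cons_ne_nil _ _)
      simp only [hd, List.head_cons] at this
      simpa using this
    refine ⟨cs.takeWhile (· ≠ '/'), r2, hq, ?_⟩
    conv_lhs => rw [← List.takeWhile_append_dropWhile (p := (· ≠ '/')) (l := cs)]
    rw [hd, he]

theorem noslash_case (cs : List Char) (h : '/' ∉ cs) : loopAL (pureSplit cs) = BcoreL cs := by
  rw [pureSplit_no_slash cs h, Bcore_noslash cs h]
  rfl

theorem mainL : ∀ (n : Nat) (cs : List Char), cs.length ≤ n → loopAL (pureSplit cs) = BcoreL cs := by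
  intro n
  induction n with
  | zero =>
    intro cs h
    have : cs = [] := by cases cs <;> simp_all
    subst this
    exact noslash_case [] (by simp)
  | succ m ih =>
    intro cs hlen
    by_cases hs : '/' ∈ cs
    · obtain ⟨seg, rest, hseg, rfl⟩ := decomp cs hs
      have hrest : rest.length ≤ m := by
        have := hlen
        simp only [List.length_append, List.length_cons] at this
        omega
      rw [pureSplit_append seg rest hseg]
      obtain ⟨tail, htail⟩ := pureSplit_head rest
      rw [htail, loopAL_cons_cons]
      by_cases hc1 : seg = "tenants".toList
      · by_cases hc2 : "TEN-".toList <+: rest.takeWhile (· ≠ '/')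
        · rw [if_pos hc1, if_pos hc2, hc1, Bcore_hit rest hc2]
        · rw [if_pos hc1, if_neg hc2, ← htail, ih rest hrest,
            Bcore_skip seg rest hseg (by rintro ⟨_, h2⟩; exact hc2 h2)]
      · rw [if_neg hc1, ← htail, ih rest hrest,
          Bcore_skip seg rest hseg (by rintro ⟨h1, _⟩; exact hc1 h1)]
    · exact noslash_case cs hs

theorem loopA_bridge : ∀ ps : List String, extractLoopA ps = (loopAL (ps.map String.toList)).map String.ofList
  | [] => rfl
  | [p] => rfl
  | p :: q :: rest => by
    rw [show extractLoopA (p :: q :: rest)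
        = if p == "tenants" then
            (if PySem.Str.startswith q "TEN-" then some q else extractLoopA (q :: rest))
          else extractLoopA (q :: rest) from rfl]
    rw [List.map_cons, List.map_cons, loopAL_cons_cons]
    by_cases h1 : p = "tenants"
    · rw [if_pos (beq_iff_eq.mpr h1), if_pos (show p.toList = "tenants".toList from by rw [h1])]
      by_cases h2 : PySem.Str.startswith q "TEN-" = true
      · have h2' := h2
        rw [PySem.Str.startswith_eq] at h2'
        rw [if_pos h2, if_pos ((PySem.Chars.startswith_iff _ _).mp h2')]
        simp
      · have h2' : ¬ (PySem.Chars.startswith q.toList ("TEN-".toList) = true) := by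
          rw [← PySem.Str.startswith_eq]; exact h2
        rw [if_neg h2, if_neg (fun hp => h2' ((PySem.Chars.startswith_iff _ _).mpr hp))]
        exact loopA_bridge (q :: rest)
    · rw [if_neg (fun hb => h1 (beq_iff_eq.mp hb)),
        if_neg (fun hl => h1 (String.toList_inj.mp hl))]
      exact loopA_bridge (q :: rest)

theorem a_toList (path : String) :
    extract_tenant_from_path_py path = (loopAL (pureSplit path.toList)).map String.ofList := by
  unfold extract_tenant_from_path_py
  have hsp := PySem.Str.split?_map path "/"
  have h2 : PySem.Chars.split? path.toList ("/").toList = some (PySem.Chars.splitOn path.toList ['/']) := by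
    rw [show ("/" : String).toList = ['/'] from rfl]
    simp [PySem.Chars.split?]
  rw [h2] at hsp
  cases hsp2 : PySem.Str.split? path "/" with
  | none => rw [hsp2] at hsp; simp at hsp
  | some parts =>
    rw [hsp2] at hsp
    simp only [Option.map_some] at hsp
    have hparts : parts.map String.toList = PySem.Chars.splitOn path.toList ['/'] := by
      injection hsp
    show extractLoopA parts = Option.map String.ofList (loopAL (pureSplit path.toList))
    rw [loopA_bridge parts, hparts, splitOn_eq_pureSplit]

theorem alt_toList (path : String) :
    extract_tenant_from_path_py_alt path = (BcoreL path.toList).map String.ofList := by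
  have hslice : ∀ (s : String) (a b : Option Int), PySem.Str.slice s a b = String.ofList (PySem.Chars.slice s.toList a b) := by
    intro s a b
    apply String.toList_inj.mp
    rw [PySem.Str.toList_slice, String.toList_ofList]
  have hsl : ("/" ++ path ++ "/").toList = '/' :: path.toList ++ ['/'] := by
    simp [String.toList_append]
  simp only [extract_tenant_from_path_py_alt, BcoreL, PySem.Str.find_eq, PySem.Str.findFrom_eq,
    hslice, hsl, show ("/" : String).toList = ['/'] from rfl]
  by_cases hk : PySem.Chars.find ('/' :: path.toList ++ ['/']) "/tenants/TEN-".toList = -1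
  · rw [if_pos hk, if_pos hk]
    rfl
  · rw [if_neg hk, if_neg hk]
    rfl

-- ===== VERDICT (by name: the statement is the Claim_ definition above) =====
theorem extract_tenant_from_path_py_spec : Claim_equal_extract_tenant_from_path_py := by
  intro path _
  unfold Spec_extract_tenant_from_path_py
  rw [a_toList, alt_toList, mainL path.toList.length path.toList le_rfl]
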